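-- pv_equiv track=rewrite | github.com/TiagoValenteM/IMS-AED_Project | intervals/functions.py | remove_common
-- ===== SOURCE A (Python) =====
-- def remove_common(interval, user_interval, matrix):
--     for number in interval[:]:
--         if number in user_interval:
--             interval.remove(number)
--             user_interval.remove(number)
--     if len(interval) == 0:
--         matrix.remove(interval)
--     return user_interval
-- ===== SOURCE B (Python) =====
-- def remove_common(interval, user_interval, matrix):
--     # Count-based O(n+m) rewrite: for each value, the first min(count) occurrences
--     # are removed from both lists; mutates interval/user_interval/matrix like A.
--     budget = {}
--     for v in interval:
--         budget[v] = budget.get(v, 0) + 1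
--     new_user = []
--     for v in user_interval:
--         if budget.get(v, 0) > 0:
--             budget[v] -= 1
--         else:
--             new_user.append(v)
--     budget = {}
--     for v in user_interval:
--         budget[v] = budget.get(v, 0) + 1
--     new_interval = []
--     for v in interval:
--         if budget.get(v, 0) > 0:
--             budget[v] -= 1
--         else:
--             new_interval.append(v)
--     interval[:] = new_interval
--     user_interval[:] = new_user
--     if not interval:
--         matrix.remove(interval)
--     return user_interval
-- ===== Notes on version B (the rewrite author's own statement) =====
-- stated objective: faster
-- what changed: A repeatedly scans user_interval with 'in' and list.remove inside a loop over interval (quadratic); B builds count dictionaries once and filters each list in a single pass, removing min(count) occurrences of each value while preserving order and all three in-place mutations.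
import Mathlib
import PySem

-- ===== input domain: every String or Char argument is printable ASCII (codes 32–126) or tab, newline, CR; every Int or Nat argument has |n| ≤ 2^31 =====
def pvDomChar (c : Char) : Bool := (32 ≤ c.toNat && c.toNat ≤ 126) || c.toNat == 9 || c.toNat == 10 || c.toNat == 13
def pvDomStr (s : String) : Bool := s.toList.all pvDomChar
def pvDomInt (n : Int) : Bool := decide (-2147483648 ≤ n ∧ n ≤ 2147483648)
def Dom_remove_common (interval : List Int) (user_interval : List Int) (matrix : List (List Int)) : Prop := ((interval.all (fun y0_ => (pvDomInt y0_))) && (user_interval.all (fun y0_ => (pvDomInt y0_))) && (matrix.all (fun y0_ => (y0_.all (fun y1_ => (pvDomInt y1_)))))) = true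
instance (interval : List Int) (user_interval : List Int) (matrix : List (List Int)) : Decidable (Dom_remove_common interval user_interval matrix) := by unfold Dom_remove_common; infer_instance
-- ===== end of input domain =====

-- B replaces A's quadratic scan-and-remove loop by one-pass count dictionaries (O(n+m));
-- both mutate interval/user_interval/matrix identically, the proof is about the return value.


-- ===== PORT A =====
-- the for-loop over interval[:], removing from both lists (remove? always succeeds here,
-- the getD default is never used)
def removeLoopA : List Int → List Int → List Int → List Int × List Int
  | [], itv, usr => (itv, usr)
  | n :: rest, itv, usr =>
    if usr.contains n then
      removeLoopA rest ((PySem.List.remove? itv n).getD itv) ((PySem.List.remove? usr n).getD usr)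
    else
      removeLoopA rest itv usr

def remove_common (interval : List Int) (user_interval : List Int) (matrix : List (List Int)) : List Int :=
  let st := removeLoopA interval interval user_interval
  -- matrix.remove(interval) mutates matrix only (raises if [] ∉ matrix: excluded by Pre_)
  st.2

-- ===== PORT B =====
def counterOf (xs : List Int) : PySem.Dict Int Int :=
  xs.foldl (fun d v => d.insert v (d.getD v 0 + 1)) PySem.Dict.empty

def dropBudget : List Int → PySem.Dict Int Int → List Int
  | [], _ => []
  | v :: rest, d =>
    if 0 < d.getD v 0 then dropBudget rest (d.insert v (d.getD v 0 - 1))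
    else v :: dropBudget rest d

def remove_common_alt (interval : List Int) (user_interval : List Int) (matrix : List (List Int)) : List Int :=
  let newUser := dropBudget user_interval (counterOf interval)
  let _newInterval := dropBudget interval (counterOf user_interval)  -- written back into interval (mutation only)
  newUser

-- ===== PRECONDITION & SPEC =====
-- Pre_ excludes exactly the inputs where A raises ValueError: every element of interval is
-- matched in user_interval (so interval is emptied) but [] is not a row of matrix.
def Pre_remove_common (interval : List Int) (user_interval : List Int) (matrix : List (List Int)) : Prop :=
  (∀ v ∈ interval, interval.count v ≤ user_interval.count v) → [] ∈ matrix
instance (interval : List Int) (user_interval : List Int) (matrix : List (List Int)) : Decidable (Pre_remove_common interval user_interval matrix) := by unfold Pre_remove_common; infer_instance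

def pvWitness_remove_common : List Int × List Int × List (List Int) := ([1, 2], [2, 3], [[5], []])

def Spec_remove_common (interval : List Int) (user_interval : List Int) (matrix : List (List Int)) (out : List Int) : Prop := out = remove_common_alt interval user_interval matrix
instance (interval : List Int) (user_interval : List Int) (matrix : List (List Int)) (out : List Int) : Decidable (Spec_remove_common interval user_interval matrix out) := by unfold Spec_remove_common; infer_instance

-- ===== CLAIM (what is proved, stated in full; the proofs are below) =====
def Claim_equal_remove_common : Prop := ∀ (interval : List Int) (user_interval : List Int) (matrix : List (List Int)), Dom_remove_common interval user_interval matrix → Pre_remove_common interval user_interval matrix → Spec_remove_common interval user_interval matrix (remove_common interval user_interval matrix)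

-- ===== LEMMAS AND PROOFS =====

-- functional model of B's budget loop: f v = remaining budget for value v
def dropF : List Int → (Int → Int) → List Int
  | [], _ => []
  | v :: rest, f =>
    if 0 < f v then dropF rest (fun w => if w = v then f v - 1 else f w)
    else v :: dropF rest f

theorem dropF_congr : ∀ (xs : List Int) (f g : Int → Int),
    (∀ v ∈ xs, f v = g v) → dropF xs f = dropF xs g := by
  intro xs
  induction xs with
  | nil => intro f g _; rfl
  | cons v rest ih =>
    intro f g h
    have hv : f v = g v := h v (List.mem_cons_self ..)
    simp only [dropF, hv]
    split
    · exact ih _ _ (fun w hw => by by_cases hwv : w = v <;> simp [hwv, h w (List.mem_cons_of_mem _ hw)])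
    · exact congrArg (v :: ·) (ih _ _ (fun w hw => h w (List.mem_cons_of_mem _ hw)))

theorem dropF_of_nonpos : ∀ (xs : List Int) (f : Int → Int),
    (∀ v ∈ xs, f v ≤ 0) → dropF xs f = xs := by
  intro xs
  induction xs with
  | nil => intro f _; rfl
  | cons v rest ih =>
    intro f h
    have : ¬ 0 < f v := not_lt.mpr (h v (List.mem_cons_self ..))
    simp only [dropF, if_neg this]
    exact congrArg (v :: ·) (ih f (fun w hw => h w (List.mem_cons_of_mem _ hw)))

-- bumping the budget of n by one means: the first occurrence of n (if any) is removed
theorem dropF_bump : ∀ (xs : List Int) (f : Int → Int) (n : Int), 0 ≤ f n →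
    dropF xs (fun w => if w = n then f n + 1 else f w) =
      (if xs.contains n then dropF ((PySem.List.remove? xs n).getD xs) f else dropF xs f) := by
  intro xs
  induction xs with
  | nil => intro f n _; rfl
  | cons v rest ih =>
    intro f n hn
    by_cases hv : v = n
    · subst hv
      have h1 : (fun w => if w = v then f v + 1 - 1
                  else if w = v then f v + 1 else f w) = f := by
        funext w; by_cases h : w = v <;> simp [h]
      simp only [dropF, if_pos, ite_true]
      rw [if_pos (show 0 < f v + 1 by omega), h1]
      simp [PySem.List.remove?_cons_self]
    · have hne : n ≠ v := fun h => hv h.symm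
      have hgv : (fun w => if w = n then f n + 1 else f w) v = f v := by simp [hv]
      have hcontains : (v :: rest).contains n = rest.contains n := by
        simp [List.contains_cons, hne]
      have hremove : PySem.List.remove? (v :: rest) n
          = (PySem.List.remove? rest n).map (v :: ·) :=
        PySem.List.remove?_cons_of_ne rest hv
      by_cases hfv : 0 < f v
      · have hfv' : 0 < (fun w => if w = n then f n + 1 else f w) v := by rw [hgv]; exact hfv
        have hfun : (fun w => if w = v then (fun w => if w = n then f n + 1 else f w) v - 1
                      else (fun w => if w = n then f n + 1 else f w) w)
            = (fun w => if w = n then (fun u => if u = v then f v - 1 else f u) n + 1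
                        else (fun u => if u = v then f v - 1 else f u) w) := by
          funext w
          by_cases h1 : w = v <;> by_cases h2 : w = n <;>
            simp [h1, h2, hv, hne] <;> first | (exfalso; exact hv (h1.symm.trans h2)) | rfl
        have hn' : 0 ≤ (fun u => if u = v then f v - 1 else f u) n := by simp [hne, hn]
        have hih := ih (fun u => if u = v then f v - 1 else f u) n hn'
        simp only [dropF, if_pos hfv', hfun, hih, hcontains, hremove]
        by_cases hc : rest.contains n = true
        · rcases PySem.List.remove?_eq_some_erase (v := n) (xs := rest)
              (by simpa using hc) with hsome
          simp only [hc, if_pos, hsome, Option.map_some, Option.getD_some]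
          simp only [dropF, if_pos hfv]
        · simp only [hc, if_neg, Bool.false_eq_true, if_false]
          simp only [dropF, if_pos hfv]
      · have hfv' : ¬ 0 < (fun w => if w = n then f n + 1 else f w) v := by rw [hgv]; exact hfv
        have hih := ih f n hn
        simp only [dropF, if_neg hfv', hih, hcontains, hremove]
        by_cases hc : rest.contains n = true
        · rcases PySem.List.remove?_eq_some_erase (v := n) (xs := rest)
              (by simpa using hc) with hsome
          simp only [hc, if_pos, hsome, Option.map_some, Option.getD_some]
          simp only [dropF, if_neg hfv]
        · simp only [hc, Bool.false_eq_true, if_false]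
          rw [if_neg hfv]

-- the usr component of A's loop only depends on counts of the processed prefix
theorem removeLoopA_snd : ∀ (copy itv usr : List Int),
    (removeLoopA copy itv usr).2 = dropF usr (fun v => (copy.count v : Int)) := by
  intro copy
  induction copy with
  | nil =>
    intro itv usr
    simp only [removeLoopA, List.count_nil]
    exact (dropF_of_nonpos usr _ (fun v _ => by simp)).symm
  | cons n rest ih =>
    intro itv usr
    have hcount : (fun v => (((n :: rest).count v : Nat) : Int))
        = (fun w => if w = n then ((rest.count n : Nat) : Int) + 1
                    else ((rest.count w : Nat) : Int)) := by
      funext v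
      by_cases h : v = n
      · subst h; simp [List.count_cons]
      · have h' : ¬ n = v := fun hh => h hh.symm
        simp [List.count_cons, h, h']
    have hbump : dropF usr (fun w => if w = n then ((rest.count n : Nat) : Int) + 1
                    else ((rest.count w : Nat) : Int))
        = (if usr.contains n then dropF ((PySem.List.remove? usr n).getD usr)
              (fun v => ((rest.count v : Nat) : Int))
           else dropF usr (fun v => ((rest.count v : Nat) : Int))) :=
      dropF_bump usr (fun v => ((rest.count v : Nat) : Int)) n (Int.natCast_nonneg _)
    rw [hcount, hbump]
    simp only [removeLoopA]
    by_cases hc : usr.contains n = true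
    · simp only [hc, if_pos, ih]
    · simp only [hc, if_neg, Bool.false_eq_true, if_false, ih]

theorem dropBudget_eq_dropF : ∀ (xs : List Int) (d : PySem.Dict Int Int),
    dropBudget xs d = dropF xs (fun v => d.getD v 0) := by
  intro xs
  induction xs with
  | nil => intro d; rfl
  | cons v rest ih =>
    intro d
    simp only [dropBudget, dropF]
    split
    · rw [ih]
      exact dropF_congr _ _ _ (fun w _ => by by_cases h : w = v <;> simp [PySem.Dict.getD_insert, h])
    · rw [ih]

theorem counterOf_getD (xs : List Int) (v : Int) :
    (counterOf xs).getD v 0 = (xs.count v : Int) := by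
  rw [show counterOf xs = PySem.Dict.counter xs from
    PySem.Dict.foldl_insert_getD_add_one_eq_counter xs]
  exact PySem.Dict.getD_counter xs v

-- ===== VERDICT (by name: the statement is the Claim_ definition above) =====
theorem remove_common_spec : Claim_equal_remove_common := by
  intro interval user_interval matrix _ _
  unfold Spec_remove_common remove_common remove_common_alt
  rw [removeLoopA_snd, dropBudget_eq_dropF]
  exact dropF_congr _ _ _ (fun v _ => (counterOf_getD interval v).symm)
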